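-- pv_equiv track=rewrite | github.com/sblumenf/podcastknowledge | transcriber/src/transcript_stitcher.py | _rebuild_transcript
-- ===== SOURCE A (Python) =====
-- from typing import List, Dict, Any, Optional, Tuple
--
-- def _rebuild_transcript(segments: List[Dict[str, Any]]) -> str:
--     """Rebuild transcript from processed segments.
--
--     Args:
--         segments: List of processed segment dictionaries
--
--     Returns:
--         Final combined transcript
--     """
--     lines = []
--
--     for segment in segments:
--         if segment["lines"]:
--             # Add segment separator comment
--             if lines:  # Not the first segment
--                 lines.append("")  # Empty line between segments
--
--             # Add all lines from this segment
--             for line_data in segment["lines"]: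
--                 lines.append(line_data["raw_text"])
--
--     return '\n'.join(lines)
-- ===== SOURCE B (Python) =====
-- def _rebuild_transcript(segments):
--     """Rebuild transcript: traverse segments back-to-front, concatenating
--     each non-empty segment's block directly onto the suffix string built so far
--     (None until the first kept segment), instead of building a flat line list."""
--     out = None
--     for segment in reversed(segments):
--         if segment["lines"]:
--             block = '\n'.join(line_data["raw_text"] for line_data in segment["lines"])
--             out = block if out is None else block + '\n\n' + out
--     return '' if out is None else out
-- ===== Notes on version B (the rewrite author's own statement) =====
-- stated objective: alternative
-- what changed: B traverses the segments in reverse, maintaining an Optional string suffix and concatenating each non-empty segment's joined block directly onto it, instead of A's forward pass that mutates one flat line list with a conditionally appended empty separator line and joins it once at the end.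
import Mathlib
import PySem

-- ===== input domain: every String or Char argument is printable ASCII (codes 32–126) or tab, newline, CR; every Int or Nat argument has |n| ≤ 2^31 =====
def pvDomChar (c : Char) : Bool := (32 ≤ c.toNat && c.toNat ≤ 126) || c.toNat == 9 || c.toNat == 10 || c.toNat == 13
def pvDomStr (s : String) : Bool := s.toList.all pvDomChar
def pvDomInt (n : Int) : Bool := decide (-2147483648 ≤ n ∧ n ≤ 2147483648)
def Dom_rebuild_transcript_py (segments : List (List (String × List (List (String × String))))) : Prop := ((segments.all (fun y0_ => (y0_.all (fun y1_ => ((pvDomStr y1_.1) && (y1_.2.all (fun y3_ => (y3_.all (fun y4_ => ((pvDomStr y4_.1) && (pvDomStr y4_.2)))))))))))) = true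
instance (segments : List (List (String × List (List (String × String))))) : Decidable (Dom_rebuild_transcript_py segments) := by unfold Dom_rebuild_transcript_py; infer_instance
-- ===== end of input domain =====

-- B traverses the segments in reverse with an Option-string accumulator, concatenating
-- each non-empty segment's joined block directly onto the suffix built so far, instead of
-- A's forward flat line list with a conditional empty separator line joined at the end.


-- ===== PORT A =====
-- segment["lines"] / line_data["raw_text"]: totalized with a default; Pre_ excludes the
-- inputs where the Python lookup raises KeyError (i.e. where get? is none).
def rebuild_transcript_py (segments : List (List (String × List (List (String × String))))) : String :=
  let lines : List String := segments.foldl (fun lines segment =>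
    let ls := PySem.Dict.getD (PySem.Dict.mk segment) "lines" []
    if ls ≠ [] then
      let lines := if lines ≠ [] then lines ++ [""] else lines
      ls.foldl (fun lines line_data =>
        lines ++ [PySem.Dict.getD (PySem.Dict.mk line_data) "raw_text" ""]) lines
    else lines) []
  PySem.Str.join "\n" lines

-- ===== PORT B =====
-- for segment in reversed(segments): …  with an Optional string accumulator
def rebuild_transcript_py_alt (segments : List (List (String × List (List (String × String))))) : String :=
  let out : Option String := segments.reverse.foldl (fun out segment =>
    let ls := PySem.Dict.getD (PySem.Dict.mk segment) "lines" []
    if ls ≠ [] then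
      let block := PySem.Str.join "\n" (ls.map (fun line_data =>
        PySem.Dict.getD (PySem.Dict.mk line_data) "raw_text" ""))
      some (match out with
        | none => block
        | some r => block ++ "\n\n" ++ r)
    else out) none
  match out with
  | none => ""
  | some s => s

-- ===== PRECONDITION & SPEC =====
-- Pre_ excludes exactly the inputs where Python raises KeyError: a segment dict without
-- key "lines", or a line dict (inside some segment's lines) without key "raw_text".
def Pre_rebuild_transcript_py (segments : List (List (String × List (List (String × String))))) : Prop :=
  ∀ segment ∈ segments,
    (PySem.Dict.get? (PySem.Dict.mk segment) "lines").isSome = true ∧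
    ∀ line_data ∈ PySem.Dict.getD (PySem.Dict.mk segment) "lines" [],
      (PySem.Dict.get? (PySem.Dict.mk line_data) "raw_text").isSome = true
instance (segments : List (List (String × List (List (String × String))))) : Decidable (Pre_rebuild_transcript_py segments) := by unfold Pre_rebuild_transcript_py; infer_instance
def pvWitness_rebuild_transcript_py : (List (List (String × List (List (String × String))))) :=
  [[("lines", [[("raw_text", "hello")], [("raw_text", "world")]])], [("lines", [])]]

def Spec_rebuild_transcript_py (segments : List (List (String × List (List (String × String))))) (out : String) : Prop := out = rebuild_transcript_py_alt segments
instance (segments : List (List (String × List (List (String × String))))) (out : String) : Decidable (Spec_rebuild_transcript_py segments out) := by unfold Spec_rebuild_transcript_py; infer_instance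

-- ===== CLAIM (what is proved, stated in full; the proofs are below) =====
def Claim_equal_rebuild_transcript_py : Prop := ∀ (segments : List (List (String × List (List (String × String))))), Dom_rebuild_transcript_py segments → Pre_rebuild_transcript_py segments → Spec_rebuild_transcript_py segments (rebuild_transcript_py segments)

-- ===== LEMMAS AND PROOFS =====

-- the text lines of one segment
def pvSegLines (segment : List (String × List (List (String × String)))) : List String :=
  (PySem.Dict.getD (PySem.Dict.mk segment) "lines" []).map
    (fun line_data => PySem.Dict.getD (PySem.Dict.mk line_data) "raw_text" "")

-- line lists of the segments with non-empty "lines"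
def pvKept (segments : List (List (String × List (List (String × String))))) : List (List String) :=
  segments.filterMap (fun segment =>
    if PySem.Dict.getD (PySem.Dict.mk segment) "lines" [] ≠ [] then some (pvSegLines segment) else none)

-- A's flat line list, abstractly: first kept block, then "" before each further block
def pvFlatHead (parts : List (List String)) : List String :=
  match parts with
  | [] => []
  | p :: rest => p ++ rest.flatMap (fun l => "" :: l)

lemma pvFlatten_map_singleton {α β : Type} (g : α → β) (l : List α) :
    (List.map (fun x => [g x]) l).flatten = List.map g l := by
  induction l with
  | nil => simp
  | cons a l ih => simp [ih]

lemma pvKept_nonempty (segments : List (List (String × List (List (String × String)))))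
    (l : List String) (hl : l ∈ pvKept segments) : l ≠ [] := by
  unfold pvKept at hl
  rcases List.mem_filterMap.mp hl with ⟨seg, _, hf⟩
  by_cases h : PySem.Dict.getD (PySem.Dict.mk seg) "lines" [] ≠ [] <;> simp [h] at hf
  subst hf
  simpa [pvSegLines] using h

lemma pvFold_acc (segments : List (List (String × List (List (String × String)))))
    : ∀ (acc : List String), acc ≠ [] →
    segments.foldl (fun lines segment =>
      let ls := PySem.Dict.getD (PySem.Dict.mk segment) "lines" []
      if ls ≠ [] then
        let lines := if lines ≠ [] then lines ++ [""] else lines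
        ls.foldl (fun lines line_data =>
          lines ++ [PySem.Dict.getD (PySem.Dict.mk line_data) "raw_text" ""]) lines
      else lines) acc
    = acc ++ (pvKept segments).flatMap (fun l => "" :: l) := by
  induction segments with
  | nil => intro acc _; simp [pvKept]
  | cons seg rest ih =>
    intro acc hacc
    rw [List.foldl_cons]
    by_cases h : PySem.Dict.getD (PySem.Dict.mk seg) "lines" [] ≠ []
    · have hstep : (let ls := PySem.Dict.getD (PySem.Dict.mk seg) "lines" []
        if ls ≠ [] then
          let lines := if acc ≠ [] then acc ++ [""] else acc
          ls.foldl (fun lines line_data =>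
            lines ++ [PySem.Dict.getD (PySem.Dict.mk line_data) "raw_text" ""]) lines
        else acc) = acc ++ "" :: pvSegLines seg := by
        simp [h, hacc, pvSegLines, pvFlatten_map_singleton]
      rw [hstep, ih (acc ++ "" :: pvSegLines seg) (by simp)]
      simp [pvKept, h]
    · have hstep : (let ls := PySem.Dict.getD (PySem.Dict.mk seg) "lines" []
        if ls ≠ [] then
          let lines := if acc ≠ [] then acc ++ [""] else acc
          ls.foldl (fun lines line_data =>
            lines ++ [PySem.Dict.getD (PySem.Dict.mk line_data) "raw_text" ""]) lines
        else acc) = acc := by simp [h]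
      rw [hstep, ih acc hacc]
      simp at h
      simp [pvKept, h]

lemma pvFold_nil (segments : List (List (String × List (List (String × String))))) :
    segments.foldl (fun lines segment =>
      let ls := PySem.Dict.getD (PySem.Dict.mk segment) "lines" []
      if ls ≠ [] then
        let lines := if lines ≠ [] then lines ++ [""] else lines
        ls.foldl (fun lines line_data =>
          lines ++ [PySem.Dict.getD (PySem.Dict.mk line_data) "raw_text" ""]) lines
      else lines) []
    = pvFlatHead (pvKept segments) := by
  induction segments with
  | nil => simp [pvKept, pvFlatHead]
  | cons seg rest ih =>
    rw [List.foldl_cons]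
    by_cases h : PySem.Dict.getD (PySem.Dict.mk seg) "lines" [] ≠ []
    · have hne : pvSegLines seg ≠ [] := by simpa [pvSegLines] using h
      have hstep : (let ls := PySem.Dict.getD (PySem.Dict.mk seg) "lines" []
        if ls ≠ [] then
          let lines := if ([] : List String) ≠ [] then [] ++ [""] else []
          ls.foldl (fun lines line_data =>
            lines ++ [PySem.Dict.getD (PySem.Dict.mk line_data) "raw_text" ""]) lines
        else []) = pvSegLines seg := by
        simp [h, pvSegLines, pvFlatten_map_singleton]
      rw [hstep, pvFold_acc rest (pvSegLines seg) hne]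
      simp [pvKept, h, pvFlatHead]
    · have hstep : (let ls := PySem.Dict.getD (PySem.Dict.mk seg) "lines" []
        if ls ≠ [] then
          let lines := if ([] : List String) ≠ [] then [] ++ [""] else []
          ls.foldl (fun lines line_data =>
            lines ++ [PySem.Dict.getD (PySem.Dict.mk line_data) "raw_text" ""]) lines
        else []) = [] := by simp [h]
      rw [hstep, ih]
      simp at h
      simp [pvKept, h]

-- char-level: intercalate over an append splits (both halves non-empty lists of parts)
lemma pvInter_append (sep : List Char) (a b : List (List Char)) (ha : a ≠ []) (hb : b ≠ []) :
    sep.intercalate (a ++ b) = sep.intercalate a ++ sep ++ sep.intercalate b := by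
  induction a with
  | nil => exact absurd rfl ha
  | cons p a' ih =>
    cases a' with
    | nil =>
      cases b with
      | nil => exact absurd rfl hb
      | cons q b' =>
        have h1 := PySem.Chars.join_cons_cons sep p q b'
        have h2 := PySem.Chars.join_singleton sep p
        simp only [PySem.Chars.join] at h1 h2
        simp [h1, h2, List.append_assoc]
    | cons p' a'' =>
      have h1 := PySem.Chars.join_cons_cons sep p p' (a'' ++ b)
      have h2 := PySem.Chars.join_cons_cons sep p p' a''
      simp only [PySem.Chars.join] at h1 h2
      have ih' := ih (by simp)
      calc sep.intercalate ((p :: p' :: a'') ++ b)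
          = p ++ sep ++ sep.intercalate (p' :: a'' ++ b) := h1
        _ = p ++ sep ++ (sep.intercalate (p' :: a'') ++ sep ++ sep.intercalate b) := by rw [ih']
        _ = sep.intercalate (p :: p' :: a'') ++ sep ++ sep.intercalate b := by
            rw [h2]; simp [List.append_assoc]

lemma pvJoin_flatHead (parts : List (List String)) (h : ∀ p ∈ parts, p ≠ []) :
    PySem.Str.join "\n" (pvFlatHead parts)
      = PySem.Str.join "\n\n" (parts.map (PySem.Str.join "\n")) := by
  apply String.toList_inj.mp
  simp only [PySem.Str.toList_join, PySem.Chars.join]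
  induction parts with
  | nil => simp [pvFlatHead, List.intercalate]
  | cons p rest ih =>
    cases rest with
    | nil =>
      have h1 := PySem.Chars.join_singleton "\n\n".toList
        ("\n".toList.intercalate (List.map String.toList p))
      simp only [PySem.Chars.join] at h1
      simpa [pvFlatHead, PySem.Chars.join] using h1.symm
    | cons q rest' =>
      have hp : List.map String.toList p ≠ [] := by
        have := h p (by simp); simp [this]
      have hflat : pvFlatHead (p :: q :: rest') = p ++ ([""] ++ pvFlatHead (q :: rest')) := by
        simp [pvFlatHead]
      have hm : List.map String.toList (pvFlatHead (q :: rest')) ≠ [] := by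
        simp only [pvFlatHead, ne_eq, List.map_eq_nil_iff, List.append_eq_nil_iff]
        intro hcon
        exact (h q (by simp)) hcon.1
      cases hml : List.map String.toList (pvFlatHead (q :: rest')) with
      | nil => exact absurd hml hm
      | cons m ms =>
        have e1 : "\n".toList.intercalate (List.map String.toList (pvFlatHead (p :: q :: rest')))
            = "\n".toList.intercalate (List.map String.toList p ++ ([] :: m :: ms)) := by
          rw [hflat]; simp [List.map_append, hml]
        have e2 := pvInter_append "\n".toList (List.map String.toList p) ([] :: m :: ms)
          hp (by simp)
        have e3 := PySem.Chars.join_cons_cons "\n".toList [] m ms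
        have e5 := PySem.Chars.join_cons_cons "\n\n".toList
          (PySem.Str.join "\n" p).toList (PySem.Str.join "\n" q).toList
          (List.map String.toList (List.map (PySem.Str.join "\n") rest'))
        simp only [PySem.Chars.join, PySem.Str.toList_join] at e3 e5
        have ih' := ih (fun x hx => h x (by simp [hx]))
        rw [hml] at ih'
        rw [e1, e2, e3, ih']
        simp only [List.map_cons, PySem.Str.toList_join, PySem.Chars.join]
        rw [e5]
        simp [List.append_assoc]

-- String-level: join over a cons with non-empty tail
lemma pvJoin_cons_ne (b : String) (bs : List String) (h : bs ≠ []) :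
    PySem.Str.join "\n\n" (b :: bs) = b ++ "\n\n" ++ PySem.Str.join "\n\n" bs := by
  cases bs with
  | nil => exact absurd rfl h
  | cons c cs =>
    apply String.toList_inj.mp
    have e := PySem.Chars.join_cons_cons "\n\n".toList b.toList c.toList
      (List.map String.toList cs)
    simp only [PySem.Chars.join] at e
    simp only [PySem.Str.toList_join, PySem.Chars.join, List.map_cons, String.toList_append]
    exact e

-- B's reverse fold computes: none if no kept segment, else some (join "\n\n" blocks)
lemma pvRevFold (segments : List (List (String × List (List (String × String))))) :
    segments.reverse.foldl (fun out segment =>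
      let ls := PySem.Dict.getD (PySem.Dict.mk segment) "lines" []
      if ls ≠ [] then
        let block := PySem.Str.join "\n" (ls.map (fun line_data =>
          PySem.Dict.getD (PySem.Dict.mk line_data) "raw_text" ""))
        some (match out with
          | none => block
          | some r => block ++ "\n\n" ++ r)
      else out) none
    = match pvKept segments with
      | [] => none
      | bs => some (PySem.Str.join "\n\n" (bs.map (PySem.Str.join "\n"))) := by
  rw [List.foldl_reverse]
  induction segments with
  | nil => simp [pvKept]
  | cons seg rest ih =>
    rw [List.foldr_cons, ih]
    by_cases h : PySem.Dict.getD (PySem.Dict.mk seg) "lines" [] ≠ []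
    · have hb : PySem.Str.join "\n" ((PySem.Dict.getD (PySem.Dict.mk seg) "lines" []).map
          (fun line_data => PySem.Dict.getD (PySem.Dict.mk line_data) "raw_text" ""))
          = PySem.Str.join "\n" (pvSegLines seg) := by simp [pvSegLines]
      have hk : pvKept (seg :: rest) = pvSegLines seg :: pvKept rest := by
        simp [pvKept, h]
      cases hr : pvKept rest with
      | nil =>
        simp only [h, if_pos, ne_eq, not_false_iff, hk, hr, hb]
        simp [PySem.Str.join]
      | cons b bs =>
        simp only [h, if_pos, ne_eq, not_false_iff, hk, hr, hb, List.map_cons]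
        rw [pvJoin_cons_ne (PySem.Str.join "\n" (pvSegLines seg))
          (PySem.Str.join "\n" b :: List.map (PySem.Str.join "\n") bs) (by simp)]
    · have hk : pvKept (seg :: rest) = pvKept rest := by
        simp at h; simp [pvKept, h]
      simp only [h, hk]
      simp

-- ===== VERDICT (by name: the statement is the Claim_ definition above) =====
theorem rebuild_transcript_py_spec : Claim_equal_rebuild_transcript_py := by
  intro segments _ _
  show rebuild_transcript_py segments = rebuild_transcript_py_alt segments
  unfold rebuild_transcript_py rebuild_transcript_py_alt
  simp only []
  rw [pvFold_nil, pvJoin_flatHead _ (pvKept_nonempty segments), pvRevFold]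
  cases h : pvKept segments with
  | nil => simp [PySem.Str.join, PySem.Chars.join, List.intercalate]
  | cons b bs => simp
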